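-- pv_equiv track=rewrite | github.com/sca075/mqtt_vacuum_camera | custom_components/valetudo_vacuum_camera/utils/img_data.py | get_rrm_max_min_rooms_coordinates
-- ===== SOURCE A (Python) =====
-- def get_rrm_max_min_rooms_coordinates(data):
--     # we need to consider that pixel size those coordinates
--     # are only to draw on the map the room area.
--     if not data:
--         return None  # Return None if the input list is empty
--     # Initialize variables to store max and min coordinates
--     max_x, max_y = data[0][0], data[0][1]
--     min_x, min_y = data[0][0], data[0][1]
--     # Iterate through the data list to find max and min coordinates
--     for entry in data:
--         x, y, _ = entry  # Extract x and y coordinates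
--         max_x = max(max_x, x)  # Update max x coordinate
--         max_y = max(max_y, y)  # Update max y coordinate
--         min_x = min(min_x, x)  # Update min x coordinate
--         min_y = min(min_y, y)  # Update min y coordinate
--     return (((max_x * 5)*10), ((max_y * 5)*10)), (((min_x * 5)*10), ((min_y * 5)*10))
-- ===== SOURCE B (Python) =====
-- def _bbox(data, lo, hi):
--     # bounding box of data[lo:hi] (hi - lo >= 1) by divide and conquer
--     if hi - lo <= 1:
--         x, y, _ = data[lo]
--         return x, y, x, y
--     mid = (lo + hi) // 2
--     ax, ay, ix, iy = _bbox(data, lo, mid)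
--     bx, by, jx, jy = _bbox(data, mid, hi)
--     return max(ax, bx), max(ay, by), min(ix, jx), min(iy, jy)
--
--
-- def get_rrm_max_min_rooms_coordinates(data):
--     if not data:
--         return None
--     mx, my, nx, ny = _bbox(data, 0, len(data))
--     return ((mx * 50, my * 50), (nx * 50, ny * 50))
-- ===== Notes on version B (the rewrite author's own statement) =====
-- stated objective: alternative
-- what changed: Replaces A's single left-to-right four-accumulator loop with a recursive divide-and-conquer that computes the bounding box of each half of the index range and merges the two boxes, scaling by 50 only at the end; correct because max/min are associative so the merge order does not matter.
import Mathlib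
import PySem

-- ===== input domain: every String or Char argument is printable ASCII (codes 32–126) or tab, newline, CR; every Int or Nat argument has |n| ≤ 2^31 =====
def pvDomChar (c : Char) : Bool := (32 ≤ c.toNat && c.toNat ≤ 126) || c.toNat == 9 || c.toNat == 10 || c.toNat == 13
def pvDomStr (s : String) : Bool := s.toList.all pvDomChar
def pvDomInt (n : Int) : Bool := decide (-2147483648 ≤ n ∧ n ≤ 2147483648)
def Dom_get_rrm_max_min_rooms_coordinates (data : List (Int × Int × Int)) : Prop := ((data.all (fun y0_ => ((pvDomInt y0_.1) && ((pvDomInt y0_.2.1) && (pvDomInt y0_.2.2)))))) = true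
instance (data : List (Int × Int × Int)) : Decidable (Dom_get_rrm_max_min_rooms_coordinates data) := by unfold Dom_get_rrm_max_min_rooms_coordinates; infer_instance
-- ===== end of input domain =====

-- B replaces A's single four-accumulator loop with a recursive divide-and-conquer bounding-box merge over index halves (alternative decomposition; same O(n) cost).


-- ===== PORT A =====
-- literal transliteration: seed all four accumulators from data[0], then fold over every entry
def get_rrm_max_min_rooms_coordinates (data : List (Int × Int × Int)) : Option ((Int × Int) × (Int × Int)) :=
  match data with
  | [] => none
  | e0 :: _ =>
    let init : Int × Int × Int × Int := (e0.1, e0.2.1, e0.1, e0.2.1)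
    let st := data.foldl (fun (s : Int × Int × Int × Int) e =>
      (max s.1 e.1, max s.2.1 e.2.1, min s.2.2.1 e.1, min s.2.2.2 e.2.1)) init
    some ((st.1 * 5 * 10, st.2.1 * 5 * 10), (st.2.2.1 * 5 * 10, st.2.2.2 * 5 * 10))

-- ===== PORT B =====
-- _bbox: bounding box (max_x, max_y, min_x, min_y) of data[lo:hi] by divide and conquer.
-- Python's base test is `hi - lo <= 1`; every call keeps lo < hi, so data[lo] is in range
-- (the `none` arm of pyGet? is unreachable; (0,0,0,0) is a type-checker placeholder there).
def bboxB (data : List (Int × Int × Int)) (lo hi : Nat) : Int × Int × Int × Int :=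
  if hi - lo ≤ 1 then
    match PySem.List.pyGet? data (lo : Int) with
    | some (x, y, _) => (x, y, x, y)
    | none => (0, 0, 0, 0)
  else
    -- mid = (lo + hi) // 2; a = _bbox(data, lo, mid); b = _bbox(data, mid, hi); merge the two boxes
    (max (bboxB data lo ((lo + hi) / 2)).1 (bboxB data ((lo + hi) / 2) hi).1,
     max (bboxB data lo ((lo + hi) / 2)).2.1 (bboxB data ((lo + hi) / 2) hi).2.1,
     min (bboxB data lo ((lo + hi) / 2)).2.2.1 (bboxB data ((lo + hi) / 2) hi).2.2.1,
     min (bboxB data lo ((lo + hi) / 2)).2.2.2 (bboxB data ((lo + hi) / 2) hi).2.2.2)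
  termination_by hi - lo
  decreasing_by all_goals omega

def get_rrm_max_min_rooms_coordinates_alt (data : List (Int × Int × Int)) : Option ((Int × Int) × (Int × Int)) :=
  match data with
  | [] => none
  | _ =>
    let st := bboxB data 0 data.length
    some ((st.1 * 50, st.2.1 * 50), (st.2.2.1 * 50, st.2.2.2 * 50))

-- ===== PRECONDITION & SPEC =====
def Spec_get_rrm_max_min_rooms_coordinates (data : List (Int × Int × Int)) (out : Option ((Int × Int) × (Int × Int))) : Prop := out = get_rrm_max_min_rooms_coordinates_alt data
instance (data : List (Int × Int × Int)) (out : Option ((Int × Int) × (Int × Int))) : Decidable (Spec_get_rrm_max_min_rooms_coordinates data out) := by unfold Spec_get_rrm_max_min_rooms_coordinates; infer_instance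

-- ===== CLAIM (what is proved, stated in full; the proofs are below) =====
def Claim_equal_get_rrm_max_min_rooms_coordinates : Prop := ∀ (data : List (Int × Int × Int)), Dom_get_rrm_max_min_rooms_coordinates data → Spec_get_rrm_max_min_rooms_coordinates data (get_rrm_max_min_rooms_coordinates data)

-- ===== LEMMAS AND PROOFS =====

-- the reference quadruple: head-seeded componentwise max/min folds over a nonempty list
def quadOf (l : List (Int × Int × Int)) : Int × Int × Int × Int :=
  match l with
  | [] => (0, 0, 0, 0)
  | e :: t => ((t.map (·.1)).foldl max e.1, (t.map (·.2.1)).foldl max e.2.1,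
               (t.map (·.1)).foldl min e.1, (t.map (·.2.1)).foldl min e.2.1)

theorem foldl_max_out (u : List Int) (m b : Int) :
    u.foldl max (max m b) = max m (u.foldl max b) := by
  induction u generalizing b with
  | nil => rfl
  | cons c t ih => simp only [List.foldl_cons, max_assoc, ih]

theorem foldl_min_out (u : List Int) (m b : Int) :
    u.foldl min (min m b) = min m (u.foldl min b) := by
  induction u generalizing b with
  | nil => rfl
  | cons c t ih => simp only [List.foldl_cons, min_assoc, ih]

theorem quadOf_append (s t : List (Int × Int × Int)) (hs : s ≠ []) (ht : t ≠ []) :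
    quadOf (s ++ t) = (max (quadOf s).1 (quadOf t).1, max (quadOf s).2.1 (quadOf t).2.1,
      min (quadOf s).2.2.1 (quadOf t).2.2.1, min (quadOf s).2.2.2 (quadOf t).2.2.2) := by
  obtain ⟨a, r, rfl⟩ := List.exists_cons_of_ne_nil hs
  obtain ⟨b, u, rfl⟩ := List.exists_cons_of_ne_nil ht
  simp only [quadOf, List.cons_append, List.map_append, List.map_cons, List.foldl_append,
    List.foldl_cons, foldl_max_out, foldl_min_out]

-- the divide-and-conquer box over [lo, hi) is the reference quadruple of that segment
theorem bboxB_eq (data : List (Int × Int × Int)) :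
    ∀ n lo hi, hi - lo = n → lo < hi → hi ≤ data.length →
      bboxB data lo hi = quadOf ((data.drop lo).take (hi - lo)) := by
  intro n
  induction n using Nat.strong_induction_on with
  | _ n ih =>
    intro lo hi hn hlt hle
    rw [bboxB]
    by_cases hbase : hi - lo ≤ 1
    · have h1 : hi - lo = 1 := by omega
      have hlo : lo < data.length := by omega
      rw [if_pos hbase, PySem.List.pyGet?_natCast, h1]
      cases hdrop : data.drop lo with
      | nil =>
        exfalso
        have := congrArg List.length hdrop
        simp at this; omega
      | cons a tl =>
        have ha : data[lo]? = some a := by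
          have h0 : (data.drop lo)[0]? = data[lo + 0]? := List.getElem?_drop
          rw [hdrop] at h0
          simpa using h0.symm
        obtain ⟨x, y, z⟩ := a
        simp [ha, quadOf]
    · rw [if_neg hbase]
      have hmid1 : lo < (lo + hi) / 2 := by omega
      have hmid2 : (lo + hi) / 2 < hi := by omega
      rw [ih ((lo + hi) / 2 - lo) (by omega) lo _ rfl hmid1 (by omega),
          ih (hi - (lo + hi) / 2) (by omega) _ hi rfl hmid2 hle]
      have hsplit : (data.drop lo).take (hi - lo)
          = (data.drop lo).take ((lo + hi) / 2 - lo) ++ (data.drop ((lo + hi) / 2)).take (hi - (lo + hi) / 2) := by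
        rw [show hi - lo = ((lo + hi) / 2 - lo) + (hi - (lo + hi) / 2) by omega, List.take_add,
          List.drop_drop, show lo + ((lo + hi) / 2 - lo) = (lo + hi) / 2 by omega]
      rw [hsplit, quadOf_append]
      · simp only [Ne, List.take_eq_nil_iff, List.drop_eq_nil_iff]
        push Not
        omega
      · simp only [Ne, List.take_eq_nil_iff, List.drop_eq_nil_iff]
        push Not
        omega

-- A's combined fold computes the four componentwise folds
theorem foldl_split (l : List (Int × Int × Int)) (mx my nx ny : Int) :
    l.foldl (fun (s : Int × Int × Int × Int) e =>
      (max s.1 e.1, max s.2.1 e.2.1, min s.2.2.1 e.1, min s.2.2.2 e.2.1)) (mx, my, nx, ny)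
    = ((l.map (·.1)).foldl max mx, (l.map (·.2.1)).foldl max my,
       (l.map (·.1)).foldl min nx, (l.map (·.2.1)).foldl min ny) := by
  induction l generalizing mx my nx ny with
  | nil => rfl
  | cons a t ih => simp [List.foldl, ih]

-- ===== VERDICT (by name: the statement is the Claim_ definition above) =====
theorem get_rrm_max_min_rooms_coordinates_spec : Claim_equal_get_rrm_max_min_rooms_coordinates := by
  intro data _
  unfold Spec_get_rrm_max_min_rooms_coordinates
  cases data with
  | nil => rfl
  | cons e0 rest =>
    simp only [get_rrm_max_min_rooms_coordinates, get_rrm_max_min_rooms_coordinates_alt]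
    rw [bboxB_eq (e0 :: rest) (e0 :: rest).length 0 (e0 :: rest).length rfl (by simp) (le_refl _)]
    simp only [List.drop_zero, Nat.sub_zero, List.take_length, quadOf, foldl_split,
      List.foldl_cons, max_self, min_self]
    simp [mul_assoc]
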